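-- pv_equiv track=rewrite | github.com/josemanuelbric-lang/ABSI-EF | x/2025_12_23_collad/3_negative.py | generar_arbol_con_marcas
-- ===== SOURCE A (Python) =====
-- def collatz(n):
--     if n % 2 == 0:
--         return n // 2, "R"
--     else:
--         return (n * 3) + 1, "L"
--
-- def generar_arbol_con_marcas(lista_inicio, niveles):
--     arbol = [{"": lista_inicio}]
--     for q1 in range(niveles):
--         nodos_actuales = arbol[-1]
--         proximo_nivel = {}
--         for ruta, semillas in nodos_actuales.items():
--             ruta_r, ruta_l = ruta + "R", ruta + "L"
--             grupo_r, grupo_l = [], []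
--             for s in semillas:
--                 nuevo_val, b = collatz(s)
--                 if b == "R": grupo_r.append(nuevo_val)
--                 else: grupo_l.append(nuevo_val)
--             if grupo_r: proximo_nivel[ruta_r] = grupo_r
--             if grupo_l: proximo_nivel[ruta_l] = grupo_l
--         arbol.append(proximo_nivel)
--     return arbol
-- ===== SOURCE B (Python) =====
-- # Depth-first traversal with an explicit stack, collecting each level's (route, seeds)
-- # pairs in lists and building the dicts once at the end, instead of A's breadth-first
-- # level-by-level dict rebuilding.
-- def generar_arbol_con_marcas(lista_inicio, niveles):
--     capas = [[] for _ in range(niveles)]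
--     pila = [("", lista_inicio, 0)]
--     while pila:
--         ruta, semillas, d = pila.pop()
--         if d >= niveles or not semillas:
--             continue
--         pares = [s // 2 for s in semillas if s % 2 == 0]
--         impares = [3 * s + 1 for s in semillas if s % 2 != 0]
--         if pares:
--             capas[d].append((ruta + "R", pares))
--         if impares:
--             capas[d].append((ruta + "L", impares))
--         if impares:
--             pila.append((ruta + "L", impares, d + 1))
--         if pares:
--             pila.append((ruta + "R", pares, d + 1))
--     return [{"": lista_inicio}] + [dict(c) for c in capas]
-- ===== Notes on version B (the rewrite author's own statement) =====
-- stated objective: alternative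
-- what changed: A builds the tree breadth-first, rebuilding a dict per level from the previous level's dict; B traverses the Collatz tree depth-first with an explicit stack, appending each node's (route, bucket) pairs into per-level lists and building each level's dict once at the end.
import Mathlib
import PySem

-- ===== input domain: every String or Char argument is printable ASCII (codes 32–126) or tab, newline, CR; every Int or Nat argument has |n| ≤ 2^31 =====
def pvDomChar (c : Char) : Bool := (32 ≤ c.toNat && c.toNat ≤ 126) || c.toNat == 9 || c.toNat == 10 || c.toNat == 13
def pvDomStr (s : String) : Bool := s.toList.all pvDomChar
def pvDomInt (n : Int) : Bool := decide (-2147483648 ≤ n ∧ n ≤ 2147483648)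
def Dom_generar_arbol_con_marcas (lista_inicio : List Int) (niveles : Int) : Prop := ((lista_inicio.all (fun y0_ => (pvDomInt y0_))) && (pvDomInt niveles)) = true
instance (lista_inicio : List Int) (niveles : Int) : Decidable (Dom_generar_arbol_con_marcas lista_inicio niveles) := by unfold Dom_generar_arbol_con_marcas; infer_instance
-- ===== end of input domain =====

-- B replaces A's breadth-first level-by-level dict rebuilding by a depth-first explicit-stack
-- traversal that collects each level's (route, bucket) pairs and builds the dicts once at the end
-- (objective: alternative — a genuinely different traversal of the same tree, similar cost).


-- ===== PORT A =====
def collatz (n : Int) : Int × String :=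
  if PySem.Int.mod n 2 == 0 then (PySem.Int.floordiv n 2, "R") else (n * 3 + 1, "L")

-- body of A's innermost loop 'for s in semillas' (state: the pair (grupo_r, grupo_l))
def pvGrupoPaso (g : List Int × List Int) (s : Int) : List Int × List Int :=
  let nb := collatz s
  if nb.2 == "R" then (g.1 ++ [nb.1], g.2) else (g.1, g.2 ++ [nb.1])

-- body of A's loop 'for ruta, semillas in nodos_actuales.items()' (state: proximo_nivel)
def pvNivelPaso (proximo : PySem.Dict String (List Int)) (par : String × List Int) :
    PySem.Dict String (List Int) :=
  let ruta := par.1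
  let semillas := par.2
  let ruta_r := ruta ++ "R"
  let ruta_l := ruta ++ "L"
  let grupos := semillas.foldl pvGrupoPaso (([] : List Int), ([] : List Int))
  let proximo := if grupos.1 ≠ [] then PySem.Dict.insert proximo ruta_r grupos.1 else proximo
  if grupos.2 ≠ [] then PySem.Dict.insert proximo ruta_l grupos.2 else proximo

-- body of A's loop 'for q1 in range(niveles)' (state: arbol, a list of dicts)
def pvArbolPaso (arbol : List (PySem.Dict String (List Int))) (_q1 : Int) :
    List (PySem.Dict String (List Int)) :=
  let nodos_actuales := (PySem.List.pyGet? arbol (-1)).getD PySem.Dict.empty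
  let proximo_nivel := nodos_actuales.items.foldl pvNivelPaso PySem.Dict.empty
  arbol ++ [proximo_nivel]

def generar_arbol_con_marcas (lista_inicio : List Int) (niveles : Int) : List (List (String × List Int)) :=
  ((PySem.List.pyRange 0 niveles 1).foldl pvArbolPaso
    [PySem.Dict.mk [("", lista_inicio)]]).map PySem.Dict.items

-- ===== PORT B =====
-- the two list comprehensions of Source B's loop body, as named helpers
def pvPares (semillas : List Int) : List Int :=
  (semillas.filter (fun s => PySem.Int.mod s 2 == 0)).map (fun s => PySem.Int.floordiv s 2)

def pvImpares (semillas : List Int) : List Int :=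
  (semillas.filter (fun s => PySem.Int.mod s 2 != 0)).map (fun s => 3 * s + 1)

-- Source B's `while pila:` loop.  `d` is ≥ 0 on every reachable stack (it starts at 0 and only
-- increases), so Python's `capas[d]` is ported as `List.modify … d.toNat` (exact for 0 ≤ d).
def walkPila (niveles : Int) (pila : List (String × List Int × Int))
    (capas : List (List (String × List Int))) : List (List (String × List Int)) :=
  match pila with
  | [] => capas
  | (ruta, semillas, d) :: resto =>
    if hg : d ≥ niveles ∨ semillas = [] then walkPila niveles resto capas
    else
      let pares := pvPares semillas
      let impares := pvImpares semillas
      let capas := if pares ≠ [] then capas.modify d.toNat (· ++ [(ruta ++ "R", pares)]) else capas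
      let capas := if impares ≠ [] then capas.modify d.toNat (· ++ [(ruta ++ "L", impares)]) else capas
      let pila' := (if pares ≠ [] then [(ruta ++ "R", pares, d + 1)] else []) ++
                   (if impares ≠ [] then [(ruta ++ "L", impares, d + 1)] else []) ++ resto
      walkPila niveles pila' capas
  termination_by (pila.map (fun x => 3 ^ (niveles - x.2.2).toNat)).sum
  decreasing_by
  · have h3 : 0 < 3 ^ (niveles - d).toNat := Nat.pow_pos (by norm_num)
    simp only [List.map_cons, List.sum_cons]
    omega
  · have hd : d < niveles := by
      rcases not_or.mp hg with ⟨h1, _⟩; omega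
    have hk : 1 ≤ (niveles - d).toNat := by omega
    have hk1 : (niveles - (d + 1)).toNat = (niveles - d).toNat - 1 := by omega
    have h3 : 3 ^ (niveles - d).toNat = 3 * 3 ^ ((niveles - d).toNat - 1) := by
      conv_lhs => rw [← Nat.sub_add_cancel hk]
      rw [pow_succ]; ring
    have h0 : 0 < 3 ^ ((niveles - d).toNat - 1) := Nat.pow_pos (by norm_num)
    by_cases hp : pvPares semillas ≠ [] <;> by_cases hi : pvImpares semillas ≠ [] <;>
      simp [hp, hi, hk1, List.sum_append] <;> omega

def generar_arbol_con_marcas_alt (lista_inicio : List Int) (niveles : Int) : List (List (String × List Int)) :=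
  let capas := (PySem.List.pyRange 0 niveles 1).map (fun _ => ([] : List (String × List Int)))
  let capas := walkPila niveles [("", lista_inicio, 0)] capas
  (PySem.Dict.mk [("", lista_inicio)] :: capas.map (fun c => PySem.Dict.ofList c)).map PySem.Dict.items

-- ===== PRECONDITION & SPEC =====
def Spec_generar_arbol_con_marcas (lista_inicio : List Int) (niveles : Int) (out : List (List (String × List Int))) : Prop := out = generar_arbol_con_marcas_alt lista_inicio niveles
instance (lista_inicio : List Int) (niveles : Int) (out : List (List (String × List Int))) : Decidable (Spec_generar_arbol_con_marcas lista_inicio niveles out) := by unfold Spec_generar_arbol_con_marcas; infer_instance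

-- ===== CLAIM (what is proved, stated in full; the proofs are below) =====
def Claim_equal_generar_arbol_con_marcas : Prop := ∀ (lista_inicio : List Int) (niveles : Int), Dom_generar_arbol_con_marcas lista_inicio niveles → Spec_generar_arbol_con_marcas lista_inicio niveles (generar_arbol_con_marcas lista_inicio niveles)

-- ===== LEMMAS AND PROOFS =====

-- The common skeleton both programs compute: per-node children, one level step, level iteration
def pvChild (e : String × List Int) : List (String × List Int) :=
  (if pvPares e.2 ≠ [] then [(e.1 ++ "R", pvPares e.2)] else []) ++
  (if pvImpares e.2 ≠ [] then [(e.1 ++ "L", pvImpares e.2)] else [])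

def pvStep (L : List (String × List Int)) : List (String × List Int) := L.flatMap pvChild

def pvIter (L : List (String × List Int)) : Nat → List (List (String × List Int))
  | 0 => []
  | m + 1 => L :: pvIter (pvStep L) m

-- string facts: appending a single marker letter is injective and the two markers never collide
lemma pv_appR_inj {r1 r2 : String} (h : r1 ++ "R" = r2 ++ "R") : r1 = r2 := by
  have h2 := congrArg String.toList h
  simp only [String.toList_append] at h2
  rw [show ("R" : String).toList = ['R'] from rfl] at h2
  exact String.toList_inj.mp (List.append_singleton_inj.mp h2).1

lemma pv_appL_inj {r1 r2 : String} (h : r1 ++ "L" = r2 ++ "L") : r1 = r2 := by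
  have h2 := congrArg String.toList h
  simp only [String.toList_append] at h2
  rw [show ("L" : String).toList = ['L'] from rfl] at h2
  exact String.toList_inj.mp (List.append_singleton_inj.mp h2).1

lemma pv_appR_ne_appL (r1 r2 : String) : r1 ++ "R" ≠ r2 ++ "L" := by
  intro h
  have h2 := congrArg String.toList h
  simp only [String.toList_append] at h2
  rw [show ("R" : String).toList = ['R'] from rfl,
      show ("L" : String).toList = ['L'] from rfl] at h2
  exact absurd (List.append_singleton_inj.mp h2).2 (by decide)

-- keys of children
lemma pv_mem_child_keys {e : String × List Int} {k : String}
    (h : k ∈ (pvChild e).map Prod.fst) : k = e.1 ++ "R" ∨ k = e.1 ++ "L" := by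
  unfold pvChild at h
  split_ifs at h <;> simp_all <;> tauto

lemma pv_nodup_child (e : String × List Int) : ((pvChild e).map Prod.fst).Nodup := by
  unfold pvChild
  split_ifs <;> simp [pv_appR_ne_appL e.1 e.1]

lemma pv_mem_step_keys {L : List (String × List Int)} {k : String}
    (h : k ∈ (pvStep L).map Prod.fst) : ∃ e ∈ L, k = e.1 ++ "R" ∨ k = e.1 ++ "L" := by
  unfold pvStep at h
  rw [List.map_flatMap] at h
  rcases List.mem_flatMap.mp h with ⟨e, he, hk⟩
  exact ⟨e, he, pv_mem_child_keys hk⟩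

lemma pv_nodup_step {L : List (String × List Int)}
    (h : (L.map Prod.fst).Nodup) : ((pvStep L).map Prod.fst).Nodup := by
  induction L with
  | nil => simp [pvStep]
  | cons e L ih =>
    simp only [List.map_cons, List.nodup_cons] at h
    have hstep : pvStep (e :: L) = pvChild e ++ pvStep L := by simp [pvStep]
    rw [hstep, List.map_append, List.nodup_append]
    refine ⟨pv_nodup_child e, ih h.2, ?_⟩
    intro a ha b hb
    rcases pv_mem_child_keys ha with rfl | rfl <;>
      rcases pv_mem_step_keys hb with ⟨e', he', rfl | rfl⟩ <;> intro heq
    · exact h.1 (by rw [pv_appR_inj heq]; exact List.mem_map_of_mem he')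
    · exact pv_appR_ne_appL e.1 e'.1 heq
    · exact pv_appR_ne_appL e'.1 e.1 heq.symm
    · exact h.1 (by rw [pv_appL_inj heq]; exact List.mem_map_of_mem he')

-- A's innermost loop computes exactly (pvPares, pvImpares)
lemma pv_grupos (vs : List Int) (gr gl : List Int) :
    vs.foldl pvGrupoPaso (gr, gl) = (gr ++ pvPares vs, gl ++ pvImpares vs) := by
  induction vs generalizing gr gl with
  | nil => simp [pvPares, pvImpares]
  | cons s vs ih =>
    simp only [List.foldl_cons]
    by_cases hs : (PySem.Int.mod s 2 == 0) = true
    · have hdvd : (2 : Int) ∣ s := by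
        have := (PySem.Int.mod_eq_zero_iff_dvd s 2).mp (by simpa using hs)
        exact this
      have hmod : s % 2 = 0 := Int.emod_eq_zero_of_dvd hdvd
      have h1 : pvGrupoPaso (gr, gl) s = (gr ++ [PySem.Int.floordiv s 2], gl) := by
        simp [pvGrupoPaso, collatz, hdvd]
      rw [h1, ih]
      simp [pvPares, pvImpares, List.filter_cons, hdvd, hmod, Int.mul_comm]
    · have hdvd : ¬ (2 : Int) ∣ s := by
        intro hc
        exact hs (by simpa using (PySem.Int.mod_eq_zero_iff_dvd s 2).mpr hc)
      have hmod : s % 2 = 1 := by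
        have h2 := Int.emod_two_eq s
        rcases h2 with h2 | h2
        · exact absurd (Int.dvd_of_emod_eq_zero h2) hdvd
        · exact h2
      have h1 : pvGrupoPaso (gr, gl) s = (gr, gl ++ [3 * s + 1]) := by
        simp [pvGrupoPaso, collatz, hdvd, Int.mul_comm]
      rw [h1, ih]
      simp [pvPares, pvImpares, List.filter_cons, hdvd, hmod, Int.mul_comm]

-- inserting a globally fresh key appends the pair
lemma pv_insert_fresh (dd : PySem.Dict String (List Int)) (k : String) (v : List Int)
    (hk : ¬ k ∈ dd.items.map Prod.fst) : (dd.insert k v).items = dd.items ++ [(k, v)] := by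
  apply PySem.Dict.items_insert_of_not_contains
  cases hc : dd.contains k
  · rfl
  · exact absurd ((PySem.Dict.contains_iff_mem_keys _ _).mp hc) hk

-- A's middle loop (dict building) appends exactly pvStep L, given globally fresh keys
lemma pv_proximo (L : List (String × List Int)) (acc : PySem.Dict String (List Int))
    (h : (acc.items.map Prod.fst ++ (pvStep L).map Prod.fst).Nodup) :
    (L.foldl pvNivelPaso acc).items = acc.items ++ pvStep L := by
  induction L generalizing acc with
  | nil => simp [pvStep]
  | cons e L ih =>
    have hstep : pvStep (e :: L) = pvChild e ++ pvStep L := by simp [pvStep]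
    rw [hstep, List.map_append, ← List.append_assoc] at h
    have hnd := List.nodup_append.mp h
    have hnd2 := List.nodup_append.mp hnd.1
    have hnotacc : ∀ k ∈ (pvChild e).map Prod.fst, ¬ k ∈ acc.items.map Prod.fst := by
      intro k hk hacc
      exact hnd2.2.2 _ hacc _ hk rfl
    have hitems : (pvNivelPaso acc e).items = acc.items ++ pvChild e := by
      simp only [pvNivelPaso, pv_grupos, List.nil_append]
      by_cases hp : pvPares e.2 ≠ [] <;> by_cases hi : pvImpares e.2 ≠ []
      · have hkR : (e.1 ++ "R") ∈ (pvChild e).map Prod.fst := by simp [pvChild, hp]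
        have hkL : (e.1 ++ "L") ∈ (pvChild e).map Prod.fst := by simp [pvChild, hi]
        have e1 : (acc.insert (e.1 ++ "R") (pvPares e.2)).items
            = acc.items ++ [(e.1 ++ "R", pvPares e.2)] :=
          pv_insert_fresh _ _ _ (hnotacc _ hkR)
        have e2 : ((acc.insert (e.1 ++ "R") (pvPares e.2)).insert (e.1 ++ "L") (pvImpares e.2)).items
            = (acc.insert (e.1 ++ "R") (pvPares e.2)).items ++ [(e.1 ++ "L", pvImpares e.2)] := by
          apply pv_insert_fresh
          rw [e1, List.map_append]
          intro hmem
          rcases List.mem_append.mp hmem with hmem | hmem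
          · exact hnotacc _ hkL hmem
          · simp only [List.map_cons, List.map_nil, List.mem_cons] at hmem
            rcases hmem with hmem | hmem
            · exact pv_appR_ne_appL e.1 e.1 hmem.symm
            · exact absurd hmem (List.not_mem_nil)
        rw [if_pos hi, if_pos hp, e2, e1, pvChild, if_pos hp, if_pos hi]
        simp
      · have hkR : (e.1 ++ "R") ∈ (pvChild e).map Prod.fst := by simp [pvChild, hp]
        rw [if_neg hi, if_pos hp, pv_insert_fresh _ _ _ (hnotacc _ hkR),
            pvChild, if_pos hp, if_neg hi]
        simp
      · have hkL : (e.1 ++ "L") ∈ (pvChild e).map Prod.fst := by simp [pvChild, hi]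
        rw [if_pos hi, if_neg hp, pv_insert_fresh _ _ _ (hnotacc _ hkL),
            pvChild, if_neg hp, if_pos hi]
        simp
      · rw [if_neg hi, if_neg hp, pvChild, if_neg hp, if_neg hi]
        simp
    have h' : ((pvNivelPaso acc e).items.map Prod.fst ++ (pvStep L).map Prod.fst).Nodup := by
      rw [hitems, List.map_append]
      exact h
    rw [List.foldl_cons, ih _ h', hitems, hstep, List.append_assoc]

-- A's outer loop, characterized level by level
lemma pv_foldA (qs : List Int) :
    ∀ (pre : List (PySem.Dict String (List Int))) (D : PySem.Dict String (List Int)),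
      (D.items.map Prod.fst).Nodup →
      ((qs.foldl pvArbolPaso (pre ++ [D])).map PySem.Dict.items)
        = pre.map PySem.Dict.items ++ D.items :: pvIter (pvStep D.items) qs.length := by
  induction qs with
  | nil => intro pre D _; simp [pvIter]
  | cons q qs ih =>
    intro pre D hD
    have hP : (List.foldl pvNivelPaso PySem.Dict.empty D.items).items = pvStep D.items := by
      have := pv_proximo D.items PySem.Dict.empty (by
        have : (PySem.Dict.empty : PySem.Dict String (List Int)).items = [] := rfl
        rw [this]
        simpa using pv_nodup_step hD)
      simpa using this
    have hbody : pvArbolPaso (pre ++ [D]) q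
        = (pre ++ [D]) ++ [List.foldl pvNivelPaso PySem.Dict.empty D.items] := by
      simp only [pvArbolPaso, PySem.List.pyGet?_neg_one_append_singleton, Option.getD_some]
    rw [List.foldl_cons, hbody, ih (pre ++ [D]) _ (by rw [hP]; exact pv_nodup_step hD)]
    rw [hP]
    simp [pvIter, List.map_append]

lemma pv_A_eq (lista : List Int) (niveles : Int) :
    generar_arbol_con_marcas lista niveles
      = [("", lista)] :: pvIter (pvStep [("", lista)]) niveles.toNat := by
  unfold generar_arbol_con_marcas
  have h := pv_foldA (PySem.List.pyRange 0 niveles 1) [] (PySem.Dict.mk [("", lista)]) (by simp)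
  simp only [List.nil_append, List.map_nil] at h
  rw [h]
  have hlen : (PySem.List.pyRange 0 niveles 1).length = niveles.toNat := by
    rw [PySem.List.length_pyRange_one]; congr 1; omega
  rw [hlen]

-- the levels B's DFS writes below a node (r, vs), m levels down
def pvT (r : String) (vs : List Int) : Nat → List (List (String × List Int))
  | 0 => []
  | m + 1 => pvChild (r, vs) ::
      List.zipWith (· ++ ·) (pvT (r ++ "R") (pvPares vs) m) (pvT (r ++ "L") (pvImpares vs) m)

lemma pv_T_length : ∀ (m : Nat) (r : String) (vs : List Int), (pvT r vs m).length = m := by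
  intro m
  induction m with
  | zero => intro r vs; rfl
  | succ m ih => intro r vs; simp [pvT, List.length_zipWith, ih, min_self]

lemma pv_zip_nil_right (ts : List (List (String × List Int))) :
    List.zipWith (· ++ ·) ts (List.replicate ts.length ([] : List (String × List Int))) = ts := by
  induction ts with
  | nil => rfl
  | cons t ts ih => simp [List.replicate_succ, ih]

lemma pv_zip_nil_left (ts : List (List (String × List Int))) :
    List.zipWith (· ++ ·) (List.replicate ts.length ([] : List (String × List Int))) ts = ts := by
  induction ts with
  | nil => rfl
  | cons t ts ih => simp [List.replicate_succ, ih]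

lemma pv_zip_nil_right' (ts : List (List (String × List Int))) (m : Nat) (h : ts.length = m) :
    List.zipWith (· ++ ·) ts (List.replicate m ([] : List (String × List Int))) = ts := by
  subst h; exact pv_zip_nil_right ts

lemma pv_zip_nil_left' (ts : List (List (String × List Int))) (m : Nat) (h : ts.length = m) :
    List.zipWith (· ++ ·) (List.replicate m ([] : List (String × List Int))) ts = ts := by
  subst h; exact pv_zip_nil_left ts

lemma pv_T_nil : ∀ (m : Nat) (r : String), pvT r [] m = List.replicate m [] := by
  intro m
  induction m with
  | zero => intro r; rfl
  | succ m ih =>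
    intro r
    have hc : pvChild (r, ([] : List Int)) = [] := by simp [pvChild, pvPares, pvImpares]
    have hp : pvPares ([] : List Int) = [] := rfl
    have hi : pvImpares ([] : List Int) = [] := rfl
    rw [pvT, hc, hp, hi, ih, ih, List.zipWith_replicate']
    simp [List.replicate_succ]

lemma pv_step_append (L1 L2 : List (String × List Int)) :
    pvStep (L1 ++ L2) = pvStep L1 ++ pvStep L2 := by simp [pvStep]

lemma pv_step_single (e : String × List Int) : pvStep [e] = pvChild e := by simp [pvStep]

lemma pv_iter_append : ∀ (m : Nat) (L1 L2 : List (String × List Int)),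
    pvIter (L1 ++ L2) m = List.zipWith (· ++ ·) (pvIter L1 m) (pvIter L2 m) := by
  intro m
  induction m with
  | zero => intro L1 L2; rfl
  | succ m ih => intro L1 L2; simp [pvIter, pv_step_append, ih]

lemma pv_child_nil (r : String) : pvChild (r, ([] : List Int)) = [] := by
  simp [pvChild, pvPares, pvImpares]

lemma pv_step_child (r : String) (vs : List Int) :
    pvStep (pvChild (r, vs))
      = pvChild (r ++ "R", pvPares vs) ++ pvChild (r ++ "L", pvImpares vs) := by
  by_cases hp : pvPares vs = [] <;> by_cases hi : pvImpares vs = []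
  · rw [hp, hi, pv_child_nil, pv_child_nil,
        show pvChild (r, vs) = [] by simp [pvChild, hp, hi]]
    rfl
  · rw [hp, pv_child_nil,
        show pvChild (r, vs) = [(r ++ "L", pvImpares vs)] by simp [pvChild, hp, hi],
        pv_step_single]
    simp
  · rw [hi, pv_child_nil,
        show pvChild (r, vs) = [(r ++ "R", pvPares vs)] by simp [pvChild, hp, hi],
        pv_step_single]
    simp
  · rw [show pvChild (r, vs) = [(r ++ "R", pvPares vs)] ++ [(r ++ "L", pvImpares vs)] by
        simp [pvChild, hp, hi],
      pv_step_append, pv_step_single, pv_step_single]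

lemma pv_T_eq_iter : ∀ (m : Nat) (r : String) (vs : List Int),
    pvT r vs m = pvIter (pvChild (r, vs)) m := by
  intro m
  induction m with
  | zero => intro r vs; rfl
  | succ m ih =>
    intro r vs
    rw [pvT, pvIter, pv_step_child, pv_iter_append, ih, ih]

-- merging a block of levels into capas starting at index i (what the DFS writes)
def pvMerge : Nat → List (List (String × List Int)) → List (List (String × List Int)) →
    List (List (String × List Int))
  | _, [], _ => []
  | _, c :: cs, [] => c :: cs
  | 0, c :: cs, t :: ts => (c ++ t) :: pvMerge 0 cs ts
  | i + 1, c :: cs, t :: ts => c :: pvMerge i cs (t :: ts)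

lemma pvMerge_nil_ts (i : Nat) (cs : List (List (String × List Int))) :
    pvMerge i cs [] = cs := by cases cs <;> rfl

lemma pvMerge_cons : ∀ (cs : List (List (String × List Int))) (i : Nat) (t : List (String × List Int)) ts,
    pvMerge i cs (t :: ts) = pvMerge (i + 1) (cs.modify i (· ++ t)) ts := by
  intro cs
  induction cs with
  | nil => intro i t ts; simp [pvMerge, List.modify_nil]
  | cons c cs ih =>
    intro i t ts
    cases i with
    | zero => cases ts <;> simp [pvMerge, List.modify_zero_cons, pvMerge_nil_ts]
    | succ i => cases ts <;> simp [pvMerge, List.modify_succ_cons, pvMerge_nil_ts, ih]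

lemma pvMerge_modify_lt (f : List (String × List Int) → List (String × List Int)) :
    ∀ (cs : List (List (String × List Int))) (i j : Nat) ts, j < i →
      (pvMerge i cs ts).modify j f = pvMerge i (cs.modify j f) ts := by
  intro cs
  induction cs with
  | nil => intro i j ts _; simp [pvMerge, List.modify_nil]
  | cons c cs ih =>
    intro i j ts hj
    cases ts with
    | nil => simp [pvMerge_nil_ts]
    | cons t ts =>
      cases i with
      | zero => omega
      | succ i =>
        cases j with
        | zero => simp [pvMerge, List.modify_zero_cons]
        | succ j =>
          simp only [pvMerge, List.modify_succ_cons]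
          rw [ih _ _ _ (by omega)]

lemma pv_modify_append : ∀ (cs : List (List (String × List Int))) (i : Nat) (a b : List (String × List Int)),
    (cs.modify i (· ++ a)).modify i (· ++ b) = cs.modify i (· ++ (a ++ b)) := by
  intro cs
  induction cs with
  | nil => intro i a b; simp [List.modify_nil]
  | cons c cs ih =>
    intro i a b
    cases i with
    | zero => simp [List.modify_zero_cons, List.append_assoc]
    | succ i => simp [List.modify_succ_cons, ih]

lemma pvMerge_zip : ∀ (ts1 ts2 : List (List (String × List Int))) (i : Nat) cs,
    ts1.length = ts2.length →
    pvMerge i cs (List.zipWith (· ++ ·) ts1 ts2) = pvMerge i (pvMerge i cs ts1) ts2 := by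
  intro ts1
  induction ts1 with
  | nil =>
    intro ts2 i cs h
    cases ts2 with
    | nil => simp [pvMerge_nil_ts]
    | cons t2 ts2 => simp at h
  | cons t1 ts1 ih =>
    intro ts2 i cs h
    cases ts2 with
    | nil => simp at h
    | cons t2 ts2 =>
      simp only [List.zipWith_cons_cons]
      rw [pvMerge_cons, ih _ _ _ (by simpa using h)]
      rw [pvMerge_cons, pvMerge_cons, pvMerge_modify_lt _ _ _ _ _ (by omega), pv_modify_append]

lemma pvMerge_replicate : ∀ (m : Nat) (cs : List (List (String × List Int))) (i : Nat),
    pvMerge i cs (List.replicate m []) = cs := by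
  intro m
  induction m with
  | zero => intro cs i; exact pvMerge_nil_ts i cs
  | succ m ih =>
    intro cs i
    rw [List.replicate_succ, pvMerge_cons, ih]
    have : (fun c : List (String × List Int) => c ++ ([] : List (String × List Int))) = id := by
      funext c; simp
    rw [this, List.modify_id]

lemma pvMerge_zero : ∀ (ts : List (List (String × List Int))) (n : Nat), ts.length = n →
    pvMerge 0 (List.replicate n ([] : List (String × List Int))) ts = ts := by
  intro ts
  induction ts with
  | nil => intro n h; subst h; rfl
  | cons t ts ih =>
    intro n h
    subst h
    simp only [List.length_cons, List.replicate_succ]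
    show pvMerge 0 ([] :: List.replicate ts.length []) (t :: ts) = t :: ts
    rw [show pvMerge 0 ([] :: List.replicate ts.length ([]:List (String × List Int))) (t :: ts)
        = (([]:List (String × List Int)) ++ t) :: pvMerge 0 (List.replicate ts.length []) ts from rfl]
    rw [ih _ rfl]
    simp

lemma pv_walk_nil (niveles : Int) (capas : List (List (String × List Int))) :
    walkPila niveles [] capas = capas := by rw [walkPila]

-- the DFS loop, characterized one stack node at a time
lemma pv_walk (niveles : Int) : ∀ (m : Nat) (r : String) (vs : List Int) (d : Int)
    (resto : List (String × List Int × Int)) (capas : List (List (String × List Int))),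
    0 ≤ d → (niveles - d).toNat = m →
    walkPila niveles ((r, vs, d) :: resto) capas
      = walkPila niveles resto (pvMerge d.toNat capas (pvT r vs m)) := by
  intro m
  induction m with
  | zero =>
    intro r vs d resto capas hd hm
    rw [walkPila, dif_pos (Or.inl (by omega))]
    rw [show pvT r vs 0 = [] from rfl, pvMerge_nil_ts]
  | succ m ih =>
    intro r vs d resto capas hd hm
    have hdt : (d + 1).toNat = d.toNat + 1 := by omega
    have hm' : (niveles - (d + 1)).toNat = m := by omega
    by_cases hvs : vs = []
    · subst hvs
      rw [walkPila, dif_pos (Or.inr rfl), pv_T_nil, pvMerge_replicate]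
    · have hg : ¬ (d ≥ niveles ∨ vs = []) := by
        push_neg
        exact ⟨by omega, hvs⟩
      rw [walkPila, dif_neg hg]
      by_cases hp : pvPares vs ≠ [] <;> by_cases hi : pvImpares vs ≠ []
      · simp only [if_pos hp, if_pos hi, List.cons_append, List.nil_append,
          List.singleton_append]
        rw [ih _ _ (d+1) _ _ (by omega) hm', ih _ _ (d+1) _ _ (by omega) hm']
        rw [pvT, pvMerge_cons,
            pvMerge_zip _ _ _ _ (by rw [pv_T_length, pv_T_length]),
            show pvChild (r, vs) = [(r ++ "R", pvPares vs)] ++ [(r ++ "L", pvImpares vs)] by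
              simp [pvChild, hp, hi],
            ← pv_modify_append, hdt]
      · rw [not_not] at hi
        simp only [if_pos hp, if_neg (show ¬ (pvImpares vs ≠ []) from fun hc => hc hi),
          List.cons_append, List.nil_append, List.singleton_append]
        rw [ih _ _ (d+1) _ _ (by omega) hm']
        rw [pvT, hi, pv_T_nil, pv_zip_nil_right' _ m (pv_T_length m (r ++ "R") (pvPares vs)),
            pvMerge_cons,
            show pvChild (r, vs) = [(r ++ "R", pvPares vs)] by simp [pvChild, hp, hi],
            hdt]
      · rw [not_not] at hp
        simp only [if_pos hi, if_neg (show ¬ (pvPares vs ≠ []) from fun hc => hc hp),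
          List.cons_append, List.nil_append, List.singleton_append]
        rw [ih _ _ (d+1) _ _ (by omega) hm']
        rw [pvT, hp, pv_T_nil, pv_zip_nil_left' _ m (pv_T_length m (r ++ "L") (pvImpares vs)),
            pvMerge_cons,
            show pvChild (r, vs) = [(r ++ "L", pvImpares vs)] by simp [pvChild, hp, hi],
            hdt]
      · rw [not_not] at hp hi
        simp only [if_neg (show ¬ (pvPares vs ≠ []) from fun hc => hc hp),
          if_neg (show ¬ (pvImpares vs ≠ []) from fun hc => hc hi), List.nil_append]
        rw [pvT, hp, hi, pv_T_nil, pv_T_nil, List.zipWith_replicate',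
            show pvChild (r, vs) = [] by simp [pvChild, hp, hi]]
        rw [show (([] : List (String × List Int)) :: List.replicate m ([] ++ []) : List (List (String × List Int)))
            = List.replicate (m+1) [] by simp [List.replicate_succ]]
        rw [pvMerge_replicate]

lemma pv_ofList_items (c : List (String × List Int)) (h : (c.map Prod.fst).Nodup) :
    (PySem.Dict.ofList c).items = c := by
  have h1 : (PySem.Dict.ofList (κ := String) (ν := List Int) c)
      = c.foldl (fun d p => d.insert p.1 p.2) PySem.Dict.empty := rfl
  rw [h1]
  have h2 := PySem.Dict.items_foldl_insert_fresh c Prod.fst Prod.snd PySem.Dict.empty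
    (fun a _ => rfl) h
  simpa using h2

lemma pv_iter_good : ∀ (m : Nat) (L : List (String × List Int)),
    (L.map Prod.fst).Nodup → ∀ lvl ∈ pvIter L m, (lvl.map Prod.fst).Nodup := by
  intro m
  induction m with
  | zero => intro L _ lvl h; simp [pvIter] at h
  | succ m ih =>
    intro L hL lvl h
    rw [pvIter, List.mem_cons] at h
    rcases h with rfl | h
    · exact hL
    · exact ih _ (pv_nodup_step hL) _ h

lemma pv_B_eq (lista : List Int) (niveles : Int) :
    generar_arbol_con_marcas_alt lista niveles
      = [("", lista)] :: pvIter (pvStep [("", lista)]) niveles.toNat := by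
  rw [show generar_arbol_con_marcas_alt lista niveles
      = (PySem.Dict.mk [("", lista)]
          :: (walkPila niveles [("", lista, 0)]
                ((PySem.List.pyRange 0 niveles 1).map (fun _ => ([] : List (String × List Int))))).map
              (fun c => PySem.Dict.ofList c)).map PySem.Dict.items from rfl]
  have hcap : (PySem.List.pyRange 0 niveles 1).map (fun _ => ([] : List (String × List Int)))
      = List.replicate niveles.toNat [] := by
    rw [List.map_const', PySem.List.length_pyRange_one]
    congr 1
    omega
  rw [hcap, pv_walk niveles niveles.toNat "" lista 0 [] _ le_rfl (by omega), pv_walk_nil]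
  rw [show ((0 : Int).toNat = 0) from rfl,
      pvMerge_zero _ _ (pv_T_length niveles.toNat "" lista), pv_T_eq_iter]
  simp only [List.map_cons, List.map_map]
  rw [pv_step_single]
  have hmap : (pvIter (pvChild ("", lista)) niveles.toNat).map
        (PySem.Dict.items ∘ fun c => PySem.Dict.ofList c)
      = pvIter (pvChild ("", lista)) niveles.toNat := by
    conv_rhs => rw [← List.map_id (pvIter (pvChild ("", lista)) niveles.toNat)]
    exact List.map_congr_left (fun lvl hlvl =>
      pv_ofList_items lvl (pv_iter_good _ _ (pv_nodup_child ("", lista)) _ hlvl))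
  rw [hmap]

-- ===== VERDICT (by name: the statement is the Claim_ definition above) =====
theorem generar_arbol_con_marcas_spec : Claim_equal_generar_arbol_con_marcas := by
  intro lista niveles _
  unfold Spec_generar_arbol_con_marcas
  rw [pv_A_eq, pv_B_eq]
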